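-- pv_equiv track=rewrite | github.com/HSJung93/-Python-CodingPractices | bank/dev-match-2021-1.py | findPop
-- ===== SOURCE A (Python) =====
-- import copy
-- from collections import deque
--
-- def howmany(i, j, x, graph):
--     new = copy.deepcopy(graph)
--     visited = [[0] * SIX for _ in range(SIX)]
--     q = deque()
--     visited[i][j] = 1
--     q.append((i, j))
--
--     while q:
--         x, y = q.popleft()
--         for dx, dy in moves:
--             nx, ny = x + dx, y + dy
--             if 0 <= nx < SIX and 0 <= ny < SIX and not visited[nx][ny] and new[nx][ny] == new[i][j]:
--                 visited[nx][ny] = 1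
--                 q.append((nx, ny))
--
--
--     return sum(map(sum, visited))
--
-- def findPop(graph):
--     for i in range(SIX):
--         for j in range(SIX):
--             if graph[i][j] != 0:
--                 cnt = 0
--                 cnt = howmany(i, j, graph[i][j], graph)
--                 if cnt >= 3:
--                     return [i, j]
--
--     return [-1, -1]
--
-- moves = [(-1, 0),(1, 0),(0, -1),(0, 1)]
--
-- SIX = 6
-- ===== SOURCE B (Python) =====
-- # Bulk set-saturation instead of BFS: the component is grown as a set, one
-- # whole frontier per round, for 36 rounds (a component of the 6x6 board has at
-- # most 36 cells, so the expansion has surely stopped); no queue, no visited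
-- # grid, no per-cell order.
-- SIX = 6
-- moves = [(-1, 0), (1, 0), (0, -1), (0, 1)]
--
-- def findPop(graph):
--     for i in range(SIX):
--         for j in range(SIX):
--             v = graph[i][j]
--             if v != 0:
--                 comp = {(i, j)}
--                 for _ in range(SIX * SIX):
--                     comp = comp | {(x + dx, y + dy) for (x, y) in comp
--                                    for dx, dy in moves
--                                    if 0 <= x + dx < SIX and 0 <= y + dy < SIX
--                                    and graph[x + dx][y + dy] == v}
--                 if len(comp) >= 3:
--                     return [i, j]
--     return [-1, -1]
-- ===== Notes on version B (the rewrite author's own statement) =====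
-- stated objective: alternative
-- what changed: Replaces the per-start BFS (deque + visited-marking grid, summed at the end) by a bulk set-saturation: the component is grown as a set of cells, one whole frontier per round, for a fixed 36 rounds (a component of the 6x6 board has at most 36 cells, so the expansion has surely reached its fixpoint), then its size is read off with len().
import Mathlib
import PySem

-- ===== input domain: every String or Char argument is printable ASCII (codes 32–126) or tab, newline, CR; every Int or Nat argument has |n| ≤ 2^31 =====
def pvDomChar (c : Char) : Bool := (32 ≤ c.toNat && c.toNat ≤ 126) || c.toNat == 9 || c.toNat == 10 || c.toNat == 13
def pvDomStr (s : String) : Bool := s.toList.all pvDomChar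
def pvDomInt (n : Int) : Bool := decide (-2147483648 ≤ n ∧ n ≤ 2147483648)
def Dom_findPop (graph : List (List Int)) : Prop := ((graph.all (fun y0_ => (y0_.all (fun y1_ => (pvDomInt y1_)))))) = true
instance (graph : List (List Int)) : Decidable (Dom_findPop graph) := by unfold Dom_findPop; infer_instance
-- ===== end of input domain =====

-- B replaces A's per-start BFS (queue + visited-marking) by a bulk set-saturation:
-- the component is grown as a set, one whole frontier per round, for 36 rounds;
-- objective: alternative algorithm, same exact results.

-- ===== PORT A =====

-- graph[i][j] read with a default; every read the claim covers is in range under Pre_findPop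
def pvG2 (g : List (List Int)) (i j : Int) : Int :=
  PySem.List.pyGetD (PySem.List.pyGetD g i []) j 0

def pvMoves : List (Int × Int) := [(-1, 0), (1, 0), (0, -1), (0, 1)]

-- [[0] * SIX for _ in range(SIX)]
def pvZeros : List (List Int) := List.replicate 6 (List.replicate 6 0)

-- visited[x][y] = 1
def pvMark (vis : List (List Int)) (x y : Int) : List (List Int) :=
  PySem.List.pySetD vis x (PySem.List.pySetD (PySem.List.pyGetD vis x []) y 1)

-- sum(map(sum, visited))
def pvSumGrid (vis : List (List Int)) : Int := (vis.map (fun r => r.sum)).sum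

-- one inner `for dx, dy in moves` step of A's BFS, on state (visited, queue)
def pvBfsStep (g : List (List Int)) (v x y : Int)
    (st : List (List Int) × List (Int × Int)) (m : Int × Int) :
    List (List Int) × List (Int × Int) :=
  let nx := x + m.1
  let ny := y + m.2
  if 0 ≤ nx ∧ nx < 6 ∧ 0 ≤ ny ∧ ny < 6 ∧ pvG2 st.1 nx ny = 0 ∧ pvG2 g nx ny = v then
    (pvMark st.1 nx ny, st.2 ++ [(nx, ny)])
  else st

-- `while q:` — fuel 100 suffices: each iteration pops one entry and at most
-- 37 entries are ever enqueued (each enqueue marks an unmarked cell of the 6×6 grid)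
def pvBfsLoop (g : List (List Int)) (v : Int) :
    Nat → List (List Int) → List (Int × Int) → List (List Int)
  | _, vis, [] => vis
  | 0, vis, _ :: _ => vis
  | fuel + 1, vis, (x, y) :: rest =>
      let st := pvMoves.foldl (pvBfsStep g v x y) (vis, rest)
      pvBfsLoop g v fuel st.1 st.2

-- copy.deepcopy(graph) is never mutated, so `new` is graph itself
def howmany (i j x : Int) (graph : List (List Int)) : Int :=
  let new := graph
  let visited := pvMark pvZeros i j
  pvSumGrid (pvBfsLoop new (pvG2 new i j) 100 visited [(i, j)])

-- the nested `for i in range(SIX): for j in range(SIX):` scan, row-major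
def pvCells : List (Int × Int) :=
  (PySem.List.pyRange 0 6 1).flatMap (fun i => (PySem.List.pyRange 0 6 1).map (fun j => (i, j)))

def pvFindLoopA (g : List (List Int)) : List (Int × Int) → List Int
  | [] => [-1, -1]
  | (i, j) :: rest =>
      if pvG2 g i j ≠ 0 then
        let cnt := howmany i j (pvG2 g i j) g
        if 3 ≤ cnt then [i, j] else pvFindLoopA g rest
      else pvFindLoopA g rest

def findPop (graph : List (List Int)) : List Int := pvFindLoopA graph pvCells

-- ===== PORT B =====

-- the set comprehension {(x+dx, y+dy) for (x, y) in comp for dx, dy in moves if …},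
-- as the candidate list it collects
def pvCand (g : List (List Int)) (v : Int) (comp : PySem.Set (Int × Int)) : List (Int × Int) :=
  comp.flatMap (fun p => pvMoves.filterMap (fun m =>
    if 0 ≤ p.1 + m.1 ∧ p.1 + m.1 < 6 ∧ 0 ≤ p.2 + m.2 ∧ p.2 + m.2 < 6 ∧
        pvG2 g (p.1 + m.1) (p.2 + m.2) = v
    then some (p.1 + m.1, p.2 + m.2) else none))

-- comp = comp | {…}
def pvExpand (g : List (List Int)) (v : Int) (comp : PySem.Set (Int × Int)) :
    PySem.Set (Int × Int) :=
  PySem.Set.union comp (PySem.Set.ofList (pvCand g v comp))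

-- comp = {(i, j)}; then `for _ in range(SIX * SIX): comp = comp | {…}`
def pvCompSet (g : List (List Int)) (i j v : Int) : PySem.Set (Int × Int) :=
  (pvExpand g v)^[36] (PySem.Set.ofList [(i, j)])

def pvFindLoopB (g : List (List Int)) : List (Int × Int) → List Int
  | [] => [-1, -1]
  | (i, j) :: rest =>
      let v := pvG2 g i j
      if v ≠ 0 then
        if 3 ≤ PySem.Set.len (pvCompSet g i j v) then [i, j] else pvFindLoopB g rest
      else pvFindLoopB g rest

def findPop_alt (graph : List (List Int)) : List Int := pvFindLoopB graph pvCells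

-- ===== PRECONDITION & SPEC =====

-- the vocabulary Pre_findPop is phrased in: in-bounds window positions, the
-- 4-neighbourhood, the equal-valued cells, and their reachable closure
abbrev pvInb (p : Int × Int) : Prop := 0 ≤ p.1 ∧ p.1 < 6 ∧ 0 ≤ p.2 ∧ p.2 < 6

def pvNbrs (p : Int × Int) : List (Int × Int) :=
  pvMoves.map (fun m => (p.1 + m.1, p.2 + m.2))

-- window cells carrying value v (missing cells read as 0)
def pvDv (g : List (List Int)) (v : Int) : Finset (Int × Int) :=
  (pvCells.filter (fun p => decide (pvG2 g p.1 p.2 = v))).toFinset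

-- one expansion step of the equal-valued component, and its closure
def pvF (g : List (List Int)) (v : Int) (S : Finset (Int × Int)) : Finset (Int × Int) :=
  S ∪ (pvDv g v).filter (fun p => ∃ n ∈ pvNbrs p, n ∈ S)

def pvReach (g : List (List Int)) (v : Int) (s : Int × Int) : Finset (Int × Int) :=
  (pvF g v)^[36] {s}

-- cell p is physically present in the ragged list-of-lists
abbrev pvExists (g : List (List Int)) (p : Int × Int) : Prop :=
  p.1 < (g.length : Int) ∧ p.2 < ((PySem.List.pyGetD g p.1 []).length : Int)

-- the flood fill started at s reads only present cells
abbrev pvSafe (g : List (List Int)) (s : Int × Int) : Prop :=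
  ∀ p ∈ pvReach g (pvG2 g s.1 s.2) s, ∀ n ∈ pvNbrs p, pvInb n → pvExists g n

-- the scan would return at s: nonzero with a component of at least 3 cells
abbrev pvStop (g : List (List Int)) (s : Int × Int) : Prop :=
  pvG2 g s.1 s.2 ≠ 0 ∧ 3 ≤ (pvReach g (pvG2 g s.1 s.2) s).card

-- A raises IndexError on any other input: Pre_findPop holds exactly when the
-- row-major scan never indexes a missing cell — every cell scanned before the
-- first popular one is present, and every flood fill started on the way reads
-- only present cells.
def Pre_findPop (graph : List (List Int)) : Prop :=
  ∀ k : Nat, k < pvCells.length →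
    (∀ k' : Nat, k' < k → ¬ pvStop graph (pvCells.getD k' (0, 0))) →
    pvExists graph (pvCells.getD k (0, 0)) ∧
      (pvG2 graph (pvCells.getD k (0, 0)).1 (pvCells.getD k (0, 0)).2 ≠ 0 →
        pvSafe graph (pvCells.getD k (0, 0)))

instance (graph : List (List Int)) : Decidable (Pre_findPop graph) := by
  unfold Pre_findPop; exact Nat.decidableBallLT _ _

def pvWitness_findPop : List (List Int) :=
  [[0, 0, 0, 0, 0, 0], [0, 0, 0, 0, 0, 0], [0, 0, 0, 0, 0, 0],
   [0, 0, 0, 0, 0, 0], [0, 0, 0, 0, 0, 0], [0, 0, 0, 0, 0, 0]]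

def Spec_findPop (graph : List (List Int)) (out : List Int) : Prop := out = findPop_alt graph
instance (graph : List (List Int)) (out : List Int) : Decidable (Spec_findPop graph out) := by
  unfold Spec_findPop; infer_instance

-- ===== CLAIM (what is proved, stated in full; the proofs are below) =====
def Claim_equal_findPop : Prop :=
  ∀ (graph : List (List Int)), Dom_findPop graph → Pre_findPop graph →
    Spec_findPop graph (findPop graph)

-- ===== LEMMAS AND PROOFS =====

def pvShape (vis : List (List Int)) : Prop := vis.length = 6 ∧ ∀ r ∈ vis, r.length = 6
def pvBool (vis : List (List Int)) : Prop := ∀ r ∈ vis, ∀ a ∈ r, a = 0 ∨ a = 1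

-- set of marked in-bounds cells of a 0/1 grid
def pvEnc (vis : List (List Int)) : Finset (Int × Int) :=
  (pvCells.filter (fun p => decide (pvG2 vis p.1 p.2 ≠ 0))).toFinset

theorem pvG2_toNat (g : List (List Int)) (x y : Int) (hx : 0 ≤ x) (hy : 0 ≤ y) :
    pvG2 g x y = (g.getD x.toNat []).getD y.toNat 0 := by
  rw [pvG2, ← Int.toNat_of_nonneg hx, ← Int.toNat_of_nonneg hy,
    PySem.List.pyGetD_natCast, PySem.List.pyGetD_natCast, Int.toNat_natCast, Int.toNat_natCast]

theorem pvMark_toNat (vis : List (List Int)) (x y : Int) (hx : 0 ≤ x) (hy : 0 ≤ y) :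
    pvMark vis x y = vis.set x.toNat ((vis.getD x.toNat []).set y.toNat 1) := by
  rw [pvMark, PySem.List.pySetD_of_nonneg _ _ hx, PySem.List.pySetD_of_nonneg _ _ hy,
    ← Int.toNat_of_nonneg hx, PySem.List.pyGetD_natCast, Int.toNat_natCast]

theorem pvG2_mark (vis : List (List Int)) (hs : pvShape vis) (x y : Int)
    (hx : pvInb (x, y)) (p : Int × Int) (hp : pvInb p) :
    pvG2 (pvMark vis x y) p.1 p.2 = if p = (x, y) then 1 else pvG2 vis p.1 p.2 := by
  obtain ⟨a, b⟩ := p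
  obtain ⟨h1, h2, h3, h4⟩ := hx
  obtain ⟨g1, g2, g3, g4⟩ := hp
  obtain ⟨hl, hr⟩ := hs
  dsimp only at *
  have hxl : x.toNat < vis.length := by omega
  have hrow : (vis.getD x.toNat []).length = 6 :=
    hr _ (by rw [List.getD_eq_getElem _ _ hxl]; exact List.getElem_mem hxl)
  rw [pvMark_toNat vis x y h1 h3, pvG2_toNat _ _ _ g1 g3, pvG2_toNat vis a b g1 g3]
  by_cases hax : a = x
  · subst hax
    have hOuter : (vis.set a.toNat ((vis.getD a.toNat []).set y.toNat 1)).getD a.toNat []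
        = (vis.getD a.toNat []).set y.toNat 1 := by
      simp [List.getD_eq_getElem?_getD, hxl]
    rw [hOuter]
    by_cases hby : b = y
    · subst hby
      have hb6 : b.toNat < (vis.getD a.toNat []).length := by omega
      simp only [List.getD_eq_getElem?_getD] at hb6 ⊢
      simp [hb6]
    · have hne : (a, b) ≠ (a, y) := by simp [hby]
      rw [if_neg hne]
      have hbn : y.toNat ≠ b.toNat := by omega
      simp [List.getD_eq_getElem?_getD, List.getElem?_set_ne hbn]
  · have hne : (a, b) ≠ (x, y) := by simp [hax]
    rw [if_neg hne]
    have : x.toNat ≠ a.toNat := by omega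
    simp [List.getD_eq_getElem?_getD, List.getElem?_set_ne this]

theorem pvShape_mark (vis : List (List Int)) (hs : pvShape vis) (x y : Int)
    (hx : pvInb (x, y)) : pvShape (pvMark vis x y) := by
  obtain ⟨h1, h2, h3, h4⟩ := hx
  obtain ⟨hl, hr⟩ := hs
  dsimp only at *
  have hxl : x.toNat < vis.length := by omega
  rw [pvMark_toNat vis x y h1 h3]
  refine ⟨by simpa using hl, ?_⟩
  intro r hrmem
  rcases List.mem_or_eq_of_mem_set hrmem with h | h
  · exact hr r h
  · subst h
    rw [List.length_set]
    exact hr _ (by rw [List.getD_eq_getElem _ _ hxl]; exact List.getElem_mem hxl)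

theorem pvBool_mark (vis : List (List Int)) (hb : pvBool vis) (hs : pvShape vis) (x y : Int)
    (hx : pvInb (x, y)) : pvBool (pvMark vis x y) := by
  obtain ⟨h1, h2, h3, h4⟩ := hx
  obtain ⟨hl, hr⟩ := hs
  dsimp only at *
  have hxl : x.toNat < vis.length := by omega
  have hrowmem : vis.getD x.toNat [] ∈ vis := by
    rw [List.getD_eq_getElem _ _ hxl]; exact List.getElem_mem hxl
  rw [pvMark_toNat vis x y h1 h3]
  intro r hrmem a hamem
  rcases List.mem_or_eq_of_mem_set hrmem with h | h
  · exact hb r h a hamem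
  · subst h
    rcases List.mem_or_eq_of_mem_set hamem with h' | h'
    · exact hb _ hrowmem a h'
    · right; exact h'

theorem mem_pvCells (p : Int × Int) : p ∈ pvCells ↔ pvInb p := by
  obtain ⟨a, b⟩ := p
  simp [pvCells, List.mem_flatMap, PySem.List.mem_pyRange_one, pvInb, Prod.ext_iff]
  tauto

theorem mem_pvEnc (vis : List (List Int)) (p : Int × Int) :
    p ∈ pvEnc vis ↔ pvInb p ∧ pvG2 vis p.1 p.2 ≠ 0 := by
  simp [pvEnc, mem_pvCells]

theorem mem_pvDv (g : List (List Int)) (v : Int) (p : Int × Int) :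
    p ∈ pvDv g v ↔ pvInb p ∧ pvG2 g p.1 p.2 = v := by
  simp [pvDv, mem_pvCells]

theorem pvEnc_mark (vis : List (List Int)) (hs : pvShape vis) (x y : Int)
    (hx : pvInb (x, y)) : pvEnc (pvMark vis x y) = insert (x, y) (pvEnc vis) := by
  ext p
  by_cases hp : pvInb p
  · rw [mem_pvEnc, Finset.mem_insert, mem_pvEnc, pvG2_mark vis hs x y hx p hp]
    by_cases hxy : p = (x, y)
    · simp [hxy]
      tauto
    · simp [hxy]
  · have h1 : p ∉ pvEnc (pvMark vis x y) := fun h => hp ((mem_pvEnc _ _).mp h).1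
    have h2 : p ∉ pvEnc vis := fun h => hp ((mem_pvEnc _ _).mp h).1
    have h3 : p ≠ (x, y) := by rintro rfl; exact hp hx
    simp [h1, h2, h3]

theorem pyGetD_zero_helper (l : List Int) (y : Int) (h : ∀ a ∈ l, a = (0 : Int)) :
    PySem.List.pyGetD l y 0 = 0 := by
  by_cases hr : PySem.Raise.InRange l.length y
  · exact h _ (PySem.List.pyGetD_mem l 0 hr)
  · exact PySem.List.pyGetD_of_none l y 0 ((PySem.List.pyGet?_eq_none_iff l y).mpr hr)

theorem pvG2_zeros (x y : Int) : pvG2 pvZeros x y = 0 := by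
  rw [pvG2]
  apply pyGetD_zero_helper
  intro a ha
  by_cases hr : PySem.Raise.InRange pvZeros.length x
  · have hmem := PySem.List.pyGetD_mem pvZeros ([] : List Int) hr
    rw [pvZeros] at hmem ha
    have h2 := List.eq_of_mem_replicate hmem
    rw [h2] at ha
    exact List.eq_of_mem_replicate ha
  · rw [PySem.List.pyGetD_of_none _ _ _ ((PySem.List.pyGet?_eq_none_iff _ x).mpr hr)] at ha
    exact absurd ha (List.not_mem_nil)

theorem pvEnc_zeros : pvEnc pvZeros = ∅ := by
  ext p; simp [mem_pvEnc, pvG2_zeros]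

theorem pvShape_zeros : pvShape pvZeros := by
  constructor <;> simp [pvZeros]

theorem pvBool_zeros : pvBool pvZeros := by
  intro r hr a ha
  rw [pvZeros] at hr
  have h := List.eq_of_mem_replicate hr
  subst h
  left; exact List.eq_of_mem_replicate ha

theorem pvEnc_subset_cells (vis : List (List Int)) : pvEnc vis ⊆ pvCells.toFinset := by
  intro p hp
  simp only [pvEnc, List.mem_toFinset, List.mem_filter] at hp
  simpa [List.mem_toFinset] using hp.1

theorem pvCells_card : pvCells.toFinset.card = 36 := by decide

theorem pvEnc_card_le (vis : List (List Int)) : (pvEnc vis).card ≤ 36 := by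
  rw [← pvCells_card]; exact Finset.card_le_card (pvEnc_subset_cells vis)

theorem pvDv_card_le (g : List (List Int)) (v : Int) : (pvDv g v).card ≤ 36 := by
  rw [← pvCells_card]
  refine Finset.card_le_card ?_
  intro p hp
  simp only [pvDv, List.mem_toFinset, List.mem_filter] at hp
  simpa [List.mem_toFinset] using hp.1

theorem mem_pvNbrs_symm (p n : Int × Int) : n ∈ pvNbrs p ↔ p ∈ pvNbrs n := by
  obtain ⟨a, b⟩ := p; obtain ⟨c, d⟩ := n
  simp [pvNbrs, pvMoves, Prod.ext_iff]
  constructor <;> (rintro (⟨h1, h2⟩ | ⟨h1, h2⟩ | ⟨h1, h2⟩ | ⟨h1, h2⟩) <;> omega)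

theorem pvF_ext (g : List (List Int)) (v : Int) (S : Finset (Int × Int)) : S ⊆ pvF g v S :=
  Finset.subset_union_left

theorem pvF_iter_ext (g : List (List Int)) (v : Int) (S : Finset (Int × Int)) (k : Nat) :
    S ⊆ (pvF g v)^[k] S := by
  induction k with
  | zero => simp
  | succ n ih =>
      rw [Function.iterate_succ_apply']
      exact ih.trans (pvF_ext g v _)

theorem pvReach_self (g : List (List Int)) (v : Int) (s : Int × Int) : s ∈ pvReach g v s :=
  pvF_iter_ext g v {s} 36 (Finset.mem_singleton_self s)

theorem pvF_iter_subset_Dv (g : List (List Int)) (v : Int) (s : Int × Int) (hs : s ∈ pvDv g v)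
    (k : Nat) : (pvF g v)^[k] {s} ⊆ pvDv g v := by
  induction k with
  | zero => simpa using hs
  | succ n ih =>
      rw [Function.iterate_succ_apply']
      intro p hp
      rcases Finset.mem_union.mp hp with h | h
      · exact ih h
      · exact (Finset.mem_filter.mp h).1

theorem pvF_chain_or_fix (g : List (List Int)) (v : Int) (S : Finset (Int × Int)) :
    ∀ n : Nat, (∃ k < n, pvF g v ((pvF g v)^[k] S) = (pvF g v)^[k] S) ∨
      S.card + n ≤ ((pvF g v)^[n] S).card := by
  intro n
  induction n with
  | zero => right; simp
  | succ n ih =>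
      rcases ih with ⟨k, hk, hfix⟩ | hcard
      · exact Or.inl ⟨k, by omega, hfix⟩
      · by_cases hfix : pvF g v ((pvF g v)^[n] S) = (pvF g v)^[n] S
        · exact Or.inl ⟨n, by omega, hfix⟩
        · right
          have hss : (pvF g v)^[n] S ⊂ pvF g v ((pvF g v)^[n] S) :=
            Finset.ssubset_iff_subset_ne.mpr ⟨pvF_ext g v _, fun e => hfix e.symm⟩
          have hlt := Finset.card_lt_card hss
          rw [Function.iterate_succ_apply']
          omega

theorem pvReach_fix (g : List (List Int)) (v : Int) (s : Int × Int) (hs : s ∈ pvDv g v) :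
    pvF g v (pvReach g v s) = pvReach g v s := by
  rcases pvF_chain_or_fix g v {s} 36 with ⟨k, hk, hfix⟩ | hcard
  · have hstays : ∀ m : Nat, (pvF g v)^[m] ((pvF g v)^[k] {s}) = (pvF g v)^[k] {s} :=
      fun m => Function.iterate_fixed hfix m
    have h36 : (pvF g v)^[36] {s} = (pvF g v)^[k] {s} := by
      have h : (36 : Nat) = (36 - k) + k := by omega
      rw [h, Function.iterate_add_apply]
      exact hstays (36 - k)
    rw [pvReach, h36]
    exact hfix
  · exfalso
    have h1 : ((pvF g v)^[36] {s}).card ≤ 36 :=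
      le_trans (Finset.card_le_card (pvF_iter_subset_Dv g v s hs 36)) (pvDv_card_le g v)
    have hs1 : ({s} : Finset (Int × Int)).card = 1 := Finset.card_singleton s
    omega

theorem pvReach_least (g : List (List Int)) (v : Int) (s : Int × Int) (T : Finset (Int × Int))
    (hsT : s ∈ T) (hcl : ∀ p ∈ pvDv g v, (∃ n ∈ pvNbrs p, n ∈ T) → p ∈ T) :
    pvReach g v s ⊆ T := by
  rw [pvReach]
  suffices h : ∀ k : Nat, (pvF g v)^[k] {s} ⊆ T from h 36
  intro k
  induction k with
  | zero => simpa using hsT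
  | succ n ih =>
      rw [Function.iterate_succ_apply']
      intro p hp
      rcases Finset.mem_union.mp hp with h | h
      · exact ih h
      · obtain ⟨hpD, hn⟩ := Finset.mem_filter.mp h
        obtain ⟨m, hm1, hm2⟩ := hn
        exact hcl p hpD ⟨m, hm1, ih hm2⟩

theorem pvInner (g : List (List Int)) (v : Int) (x y : Int) :
    ∀ (ms : List (Int × Int)), (∀ m ∈ ms, m ∈ pvMoves) →
    ∀ (vis : List (List Int)) (q0 : List (Int × Int)), pvShape vis → pvBool vis →
    ∃ added : List (Int × Int),
      (ms.foldl (pvBfsStep g v x y) (vis, q0)).2 = q0 ++ added ∧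
      pvShape (ms.foldl (pvBfsStep g v x y) (vis, q0)).1 ∧
      pvBool (ms.foldl (pvBfsStep g v x y) (vis, q0)).1 ∧
      pvEnc (ms.foldl (pvBfsStep g v x y) (vis, q0)).1 = pvEnc vis ∪ added.toFinset ∧
      (pvEnc (ms.foldl (pvBfsStep g v x y) (vis, q0)).1).card
        = (pvEnc vis).card + added.length ∧
      (∀ a ∈ added, a ∈ pvNbrs (x, y) ∧ a ∈ pvDv g v) ∧
      (∀ m ∈ ms, (x + m.1, y + m.2) ∈ pvDv g v →
        (x + m.1, y + m.2) ∈ pvEnc (ms.foldl (pvBfsStep g v x y) (vis, q0)).1) := by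
  intro ms
  induction ms with
  | nil =>
      intro _ vis q0 hsh hbo
      exact ⟨[], by simp, hsh, hbo, by simp, by simp, by simp, by simp⟩
  | cons m ms ih =>
      intro hms vis q0 hsh hbo
      have hmMoves : m ∈ pvMoves := hms m List.mem_cons_self
      have hmsTail : ∀ m' ∈ ms, m' ∈ pvMoves := fun m' hm' => hms m' (List.mem_cons_of_mem m hm')
      rw [List.foldl_cons]
      by_cases hc : 0 ≤ x + m.1 ∧ x + m.1 < 6 ∧ 0 ≤ y + m.2 ∧ y + m.2 < 6 ∧
          pvG2 vis (x + m.1) (y + m.2) = 0 ∧ pvG2 g (x + m.1) (y + m.2) = v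
      · have hstep : pvBfsStep g v x y (vis, q0) m
            = (pvMark vis (x + m.1) (y + m.2), q0 ++ [(x + m.1, y + m.2)]) := by
          simp only [pvBfsStep]
          rw [if_pos hc]
        obtain ⟨c1, c2, c3, c4, c5, c6⟩ := hc
        have hinb : pvInb (x + m.1, y + m.2) := ⟨c1, c2, c3, c4⟩
        have hsh' := pvShape_mark vis hsh (x + m.1) (y + m.2) hinb
        have hbo' := pvBool_mark vis hbo hsh (x + m.1) (y + m.2) hinb
        obtain ⟨added', hq, hsh2, hbo2, henc, hcard, hprops, hlast⟩ :=
          ih hmsTail (pvMark vis (x + m.1) (y + m.2)) (q0 ++ [(x + m.1, y + m.2)]) hsh' hbo'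
        have hfresh : (x + m.1, y + m.2) ∉ pvEnc vis := by
          rw [mem_pvEnc]; rintro ⟨_, hne⟩; exact hne c5
        have hEmark := pvEnc_mark vis hsh (x + m.1) (y + m.2) hinb
        rw [hstep]
        refine ⟨(x + m.1, y + m.2) :: added', ?_, ?_, ?_, ?_, ?_, ?_, ?_⟩
        · rw [hq, List.append_assoc, List.singleton_append]
        · exact hsh2
        · exact hbo2
        · rw [henc, hEmark, List.toFinset_cons]
          ext r
          simp only [Finset.mem_union, Finset.mem_insert]
          tauto
        · rw [hcard, hEmark, Finset.card_insert_of_notMem hfresh, List.length_cons]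
          omega
        · intro a ha
          rcases List.mem_cons.mp ha with rfl | ha'
          · constructor
            · exact List.mem_map.mpr ⟨m, hmMoves, rfl⟩
            · rw [mem_pvDv]; exact ⟨hinb, c6⟩
          · exact hprops a ha'
        · intro m' hm' _
          rcases List.mem_cons.mp hm' with rfl | hm''
          · rw [henc, hEmark]
            exact Finset.mem_union_left _ (Finset.mem_insert_self _ _)
          · refine hlast m' hm'' ?_
            assumption
      · have hstep : pvBfsStep g v x y (vis, q0) m = (vis, q0) := by
          simp only [pvBfsStep]
          rw [if_neg hc]
        obtain ⟨added', hq, hsh2, hbo2, henc, hcard, hprops, hlast⟩ := ih hmsTail vis q0 hsh hbo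
        rw [hstep]
        refine ⟨added', hq, hsh2, hbo2, henc, hcard, hprops, ?_⟩
        intro m' hm' hDv
        rcases List.mem_cons.mp hm' with rfl | hm''
        · rw [mem_pvDv] at hDv
          obtain ⟨⟨d1, d2, d3, d4⟩, d5⟩ := hDv
          have hne : pvG2 vis (x + m'.1) (y + m'.2) ≠ 0 := by
            intro h0
            exact hc ⟨d1, d2, d3, d4, h0, d5⟩
          have hEmem : (x + m'.1, y + m'.2) ∈ pvEnc vis := by
            rw [mem_pvEnc]; exact ⟨⟨d1, d2, d3, d4⟩, hne⟩
          rw [henc]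
          exact Finset.mem_union_left _ hEmem
        · exact hlast m' hm'' hDv

theorem pvBfs_main (g : List (List Int)) (v : Int) (s : Int × Int) (hs : s ∈ pvDv g v) :
    ∀ (fuel : Nat) (vis : List (List Int)) (q : List (Int × Int)),
      pvShape vis → pvBool vis →
      (∀ p ∈ q, p ∈ pvEnc vis) →
      s ∈ pvEnc vis →
      pvEnc vis ⊆ pvDv g v →
      (∀ p ∈ pvEnc vis, p ∉ q → ∀ n ∈ pvNbrs p, n ∈ pvDv g v → n ∈ pvEnc vis) →
      pvEnc vis ⊆ pvReach g v s →
      2 * (36 - (pvEnc vis).card) + q.length ≤ fuel →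
      pvEnc (pvBfsLoop g v fuel vis q) = pvReach g v s ∧
        pvShape (pvBfsLoop g v fuel vis q) ∧ pvBool (pvBfsLoop g v fuel vis q) := by
  intro fuel
  induction fuel with
  | zero =>
      intro vis q hsh hbo hq hsE hDv hcl hR hfuel
      cases q with
      | nil =>
          refine ⟨?_, hsh, hbo⟩
          refine Finset.Subset.antisymm hR (pvReach_least g v s (pvEnc vis) hsE ?_)
          intro p hpDv ⟨n, hn1, hn2⟩
          exact hcl n hn2 (fun h => (List.not_mem_nil h)) p ((mem_pvNbrs_symm n p).mpr hn1) hpDv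
      | cons hd tl => simp at hfuel
  | succ fuel ih =>
      intro vis q hsh hbo hq hsE hDv hcl hR hfuel
      cases q with
      | nil =>
          refine ⟨?_, hsh, hbo⟩
          refine Finset.Subset.antisymm hR (pvReach_least g v s (pvEnc vis) hsE ?_)
          intro p hpDv ⟨n, hn1, hn2⟩
          exact hcl n hn2 (fun h => (List.not_mem_nil h)) p ((mem_pvNbrs_symm n p).mpr hn1) hpDv
      | cons hd rest =>
          obtain ⟨x, y⟩ := hd
          have hunfold : pvBfsLoop g v (fuel + 1) vis ((x, y) :: rest)
              = pvBfsLoop g v fuel (pvMoves.foldl (pvBfsStep g v x y) (vis, rest)).1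
                  (pvMoves.foldl (pvBfsStep g v x y) (vis, rest)).2 := rfl
          rw [hunfold]
          obtain ⟨added, hq2, hsh2, hbo2, henc, hcard, hprops, hlast⟩ :=
            pvInner g v x y pvMoves (fun m hm => hm) vis rest hsh hbo
          have hxyE : (x, y) ∈ pvEnc vis := hq (x, y) List.mem_cons_self
          have hEsub : pvEnc vis ⊆ pvEnc (pvMoves.foldl (pvBfsStep g v x y) (vis, rest)).1 := by
            rw [henc]; exact Finset.subset_union_left
          have haddE : ∀ a ∈ added, a ∈ pvEnc (pvMoves.foldl (pvBfsStep g v x y) (vis, rest)).1 := by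
            intro a ha
            rw [henc]
            exact Finset.mem_union_right _ (List.mem_toFinset.mpr ha)
          have hcard36 : (pvEnc (pvMoves.foldl (pvBfsStep g v x y) (vis, rest)).1).card ≤ 36 :=
            pvEnc_card_le _
          rw [hq2]
          refine ih _ _ hsh2 hbo2 ?_ (hEsub hsE) ?_ ?_ ?_ ?_
          · intro p hp
            rcases List.mem_append.mp hp with h | h
            · exact hEsub (hq p (List.mem_cons_of_mem _ h))
            · exact haddE p h
          · rw [henc]
            intro p hp
            rcases Finset.mem_union.mp hp with h | h
            · exact hDv h
            · exact (hprops p (List.mem_toFinset.mp h)).2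
          · intro p hpE hpq n hn hnDv
            rcases Finset.mem_union.mp (henc ▸ hpE) with hpv | hpadd
            · by_cases hpxy : p = (x, y)
              · subst hpxy
                obtain ⟨m, hm, rfl⟩ := List.mem_map.mp hn
                exact hlast m hm hnDv
              · have hprest : p ∉ rest := fun h => hpq (List.mem_append.mpr (Or.inl h))
                have hpoldq : p ∉ (x, y) :: rest := by
                  intro h
                  rcases List.mem_cons.mp h with h' | h'
                  · exact hpxy h'
                  · exact hprest h'
                exact hEsub (hcl p hpv hpoldq n hn hnDv)
            · exact absurd (List.mem_append.mpr (Or.inr (List.mem_toFinset.mp hpadd))) hpq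
          · rw [henc]
            intro p hp
            rcases Finset.mem_union.mp hp with h | h
            · exact hR h
            · have hpa := hprops p (List.mem_toFinset.mp h)
              have hxyR : (x, y) ∈ pvReach g v s := hR hxyE
              rw [← pvReach_fix g v s hs, pvF]
              refine Finset.mem_union_right _ (Finset.mem_filter.mpr ⟨hpa.2, ?_⟩)
              exact ⟨(x, y), (mem_pvNbrs_symm (x, y) p).mp hpa.1, hxyR⟩
          · rw [List.length_append]
            have h1 := pvEnc_card_le vis
            simp only [List.length_cons] at hfuel
            omega

theorem pvCells_nodup : pvCells.Nodup := by decide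

theorem pvRowBridge (r : List Int) (h6 : r.length = 6) (hb : ∀ a ∈ r, a = 0 ∨ a = 1) :
    r.sum = ((([0,1,2,3,4,5] : List Int).countP
      (fun j => decide (PySem.List.pyGetD r j 0 ≠ 0)) : Nat) : Int) := by
  rcases r with _ | ⟨a0, _ | ⟨a1, _ | ⟨a2, _ | ⟨a3, _ | ⟨a4, _ | ⟨a5, t⟩⟩⟩⟩⟩⟩ <;> simp_all
  rcases t with _ | ⟨x, t⟩
  · have h0 := hb.1
    have h1 := hb.2.1
    have h2 := hb.2.2.1
    have h3 := hb.2.2.2.1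
    have h4 := hb.2.2.2.2.1
    have h5 := hb.2.2.2.2.2
    rcases h0 with rfl | rfl <;> rcases h1 with rfl | rfl <;> rcases h2 with rfl | rfl <;>
      rcases h3 with rfl | rfl <;> rcases h4 with rfl | rfl <;> rcases h5 with rfl | rfl <;> decide
  · simp at h6

theorem pvSum_card (vis : List (List Int)) (hsh : pvShape vis) (hbo : pvBool vis) :
    pvSumGrid vis = (((pvEnc vis).card : Nat) : Int) := by
  have hcard : (pvEnc vis).card = pvCells.countP (fun p => decide (pvG2 vis p.1 p.2 ≠ 0)) := by
    rw [pvEnc, List.toFinset_card_of_nodup (pvCells_nodup.filter _), List.countP_eq_length_filter]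
  obtain ⟨h6, hr⟩ := hsh
  rcases vis with _ | ⟨r0, _ | ⟨r1, _ | ⟨r2, _ | ⟨r3, _ | ⟨r4, _ | ⟨r5, t⟩⟩⟩⟩⟩⟩ <;> try simp at h6
  rcases t with _ | ⟨x, t⟩
  swap
  · simp at h6
  have e0 : r0.length = 6 := hr r0 (by simp)
  have e1 : r1.length = 6 := hr r1 (by simp)
  have e2 : r2.length = 6 := hr r2 (by simp)
  have e3 : r3.length = 6 := hr r3 (by simp)
  have e4 : r4.length = 6 := hr r4 (by simp)
  have e5 : r5.length = 6 := hr r5 (by simp)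
  have b0 := hbo r0 (by simp)
  have b1 := hbo r1 (by simp)
  have b2 := hbo r2 (by simp)
  have b3 := hbo r3 (by simp)
  have b4 := hbo r4 (by simp)
  have b5 := hbo r5 (by simp)
  have hsplit : pvCells = ([(0,0),(0,1),(0,2),(0,3),(0,4),(0,5)] : List (Int × Int))
      ++ [(1,0),(1,1),(1,2),(1,3),(1,4),(1,5)] ++ [(2,0),(2,1),(2,2),(2,3),(2,4),(2,5)]
      ++ [(3,0),(3,1),(3,2),(3,3),(3,4),(3,5)] ++ [(4,0),(4,1),(4,2),(4,3),(4,4),(4,5)]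
      ++ [(5,0),(5,1),(5,2),(5,3),(5,4),(5,5)] := by decide
  have hg : ∀ (i : Int) (ri : List Int), PySem.List.pyGetD [r0,r1,r2,r3,r4,r5] i [] = ri →
      ∀ j : Int, pvG2 [r0,r1,r2,r3,r4,r5] i j = PySem.List.pyGetD ri j 0 := by
    intro i ri hi j
    rw [pvG2, hi]
  have hrow : ∀ (i : Int) (ri : List Int), PySem.List.pyGetD [r0,r1,r2,r3,r4,r5] i [] = ri →
      (([(i,0),(i,1),(i,2),(i,3),(i,4),(i,5)] : List (Int × Int)).countP
          (fun p => decide (pvG2 [r0,r1,r2,r3,r4,r5] p.1 p.2 ≠ 0)))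
        = (([0,1,2,3,4,5] : List Int).countP (fun j => decide (PySem.List.pyGetD ri j 0 ≠ 0))) := by
    intro i ri hi
    simp only [List.countP_cons, List.countP_nil, hg i ri hi]
  rw [hcard, hsplit]
  simp only [List.countP_append]
  rw [hrow 0 r0 rfl, hrow 1 r1 rfl, hrow 2 r2 rfl, hrow 3 r3 rfl, hrow 4 r4 rfl, hrow 5 r5 rfl]
  rw [pvSumGrid]
  simp only [List.map_cons, List.map_nil, List.sum_cons, List.sum_nil]
  rw [pvRowBridge r0 e0 b0, pvRowBridge r1 e1 b1, pvRowBridge r2 e2 b2,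
    pvRowBridge r3 e3 b3, pvRowBridge r4 e4 b4, pvRowBridge r5 e5 b5]
  push_cast
  ring

theorem mem_pvCand (g : List (List Int)) (v : Int) (comp : PySem.Set (Int × Int))
    (n : Int × Int) :
    n ∈ pvCand g v comp ↔ n ∈ pvDv g v ∧ ∃ p ∈ comp, n ∈ pvNbrs p := by
  rw [pvCand, List.mem_flatMap, mem_pvDv]
  constructor
  · rintro ⟨p, hp, hn⟩
    rw [List.mem_filterMap] at hn
    obtain ⟨m, hm, hsome⟩ := hn
    split at hsome
    · rename_i hcond
      obtain ⟨c1, c2, c3, c4, c5⟩ := hcond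
      cases hsome
      exact ⟨⟨⟨c1, c2, c3, c4⟩, c5⟩, p, hp, List.mem_map.mpr ⟨m, hm, rfl⟩⟩
    · exact absurd hsome (by simp)
  · rintro ⟨⟨hinb, hval⟩, p, hp, hn⟩
    refine ⟨p, hp, ?_⟩
    rw [List.mem_filterMap]
    obtain ⟨m, hm, rfl⟩ := List.mem_map.mp hn
    refine ⟨m, hm, ?_⟩
    rw [if_pos ⟨hinb.1, hinb.2.1, hinb.2.2.1, hinb.2.2.2, hval⟩]

theorem pvExpand_spec (g : List (List Int)) (v : Int) (comp : PySem.Set (Int × Int))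
    (hnd : comp.Nodup) :
    (pvExpand g v comp).toFinset = pvF g v comp.toFinset ∧ (pvExpand g v comp).Nodup := by
  constructor
  · ext x
    rw [List.mem_toFinset, pvExpand, PySem.Set.mem_union, PySem.Set.mem_ofList, mem_pvCand,
      pvF, Finset.mem_union, Finset.mem_filter, List.mem_toFinset]
    constructor
    · rintro (h | ⟨hDv, p, hp, hn⟩)
      · exact Or.inl h
      · exact Or.inr ⟨hDv, p, (mem_pvNbrs_symm p x).mp hn, List.mem_toFinset.mpr hp⟩
    · rintro (h | ⟨hDv, p, hn, hp⟩)
      · exact Or.inl h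
      · exact Or.inr ⟨hDv, p, List.mem_toFinset.mp hp, (mem_pvNbrs_symm x p).mp hn⟩
  · exact PySem.Set.nodup_union _ _ hnd

theorem pvIterSet (g : List (List Int)) (v : Int) (s0 : PySem.Set (Int × Int))
    (hnd : s0.Nodup) (k : Nat) :
    ((pvExpand g v)^[k] s0).toFinset = (pvF g v)^[k] s0.toFinset ∧
      ((pvExpand g v)^[k] s0).Nodup := by
  induction k with
  | zero => exact ⟨rfl, hnd⟩
  | succ n ih =>
      rw [Function.iterate_succ_apply', Function.iterate_succ_apply']
      obtain ⟨h1, h2⟩ := pvExpand_spec g v _ ih.2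
      exact ⟨by rw [h1, ih.1], h2⟩

theorem pvCompSet_len (g : List (List Int)) (i j v : Int) :
    PySem.Set.len (pvCompSet g i j v) = (((pvReach g v (i, j)).card : Nat) : Int) := by
  obtain ⟨h1, h2⟩ := pvIterSet g v (PySem.Set.ofList [(i, j)]) (PySem.Set.nodup_ofList _) 36
  have hs : (PySem.Set.ofList [(i, j)] : List (Int × Int)).toFinset = {(i, j)} := by
    have : (PySem.Set.ofList [(i, j)] : List (Int × Int)) = [(i, j)] := rfl
    rw [this]
    simp
  rw [hs] at h1
  have hlen : ((pvCompSet g i j v).toFinset).card = (pvCompSet g i j v).length :=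
    List.toFinset_card_of_nodup h2
  have hL : PySem.Set.len (pvCompSet g i j v) = ((pvCompSet g i j v).length : Int) :=
    PySem.List.len_eq _
  rw [hL, ← hlen, pvCompSet, h1, pvReach]

theorem pvCore (g : List (List Int)) (i j : Int) (h : pvInb (i, j)) :
    howmany i j (pvG2 g i j) g = PySem.Set.len (pvCompSet g i j (pvG2 g i j)) := by
  have hs : (i, j) ∈ pvDv g (pvG2 g i j) := (mem_pvDv g _ (i, j)).mpr ⟨h, rfl⟩
  have hsh0 := pvShape_mark pvZeros pvShape_zeros i j h
  have hbo0 := pvBool_mark pvZeros pvBool_zeros pvShape_zeros i j h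
  have henc0 : pvEnc (pvMark pvZeros i j) = {(i, j)} := by
    rw [pvEnc_mark pvZeros pvShape_zeros i j h, pvEnc_zeros]
    rfl
  have hA := pvBfs_main g (pvG2 g i j) (i, j) hs 100 (pvMark pvZeros i j) [(i, j)]
    hsh0 hbo0
    (by intro p hp
        rw [henc0]
        rcases List.mem_singleton.mp hp with rfl
        exact Finset.mem_singleton_self _)
    (by rw [henc0]; exact Finset.mem_singleton_self _)
    (by rw [henc0]; exact Finset.singleton_subset_iff.mpr hs)
    (by intro p hp hpq
        rw [henc0] at hp
        rcases Finset.mem_singleton.mp hp with rfl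
        exact absurd (List.mem_singleton.mpr rfl) hpq)
    (by rw [henc0]
        exact Finset.singleton_subset_iff.mpr (pvReach_self g _ (i, j)))
    (by rw [henc0, Finset.card_singleton, List.length_singleton]; omega)
  show pvSumGrid (pvBfsLoop g (pvG2 g i j) 100 (pvMark pvZeros i j) [(i, j)]) = _
  rw [pvSum_card _ hA.2.1 hA.2.2, hA.1, pvCompSet_len]

theorem pvLoops_eq (g : List (List Int)) :
    ∀ l : List (Int × Int), (∀ p ∈ l, pvInb p) → pvFindLoopA g l = pvFindLoopB g l := by
  intro l
  induction l with
  | nil => intro _; rfl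
  | cons p rest ih =>
      intro hl
      obtain ⟨i, j⟩ := p
      have hinb : pvInb (i, j) := hl (i, j) List.mem_cons_self
      have htail : ∀ p ∈ rest, pvInb p := fun p hp => hl p (List.mem_cons_of_mem _ hp)
      show pvFindLoopA g ((i, j) :: rest) = pvFindLoopB g ((i, j) :: rest)
      rw [pvFindLoopA, pvFindLoopB]
      simp only [pvCore g i j hinb]
      split_ifs <;> first | rfl | exact ih htail

-- ===== VERDICT (by name: the statement is the Claim_ definition above) =====
theorem findPop_spec : Claim_equal_findPop := by
  intro graph _ _
  unfold Spec_findPop findPop findPop_alt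
  exact pvLoops_eq graph pvCells (fun p hp => (mem_pvCells p).mp hp)
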